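-- pv_equiv track=rewrite | github.com/asinggih/Advent-of-Code | py/day_02/day_02.py | rps_reverse
-- ===== SOURCE A (Python) =====
-- def rps_result(opponent: str, my_choice: str) -> str:
--
--     if (opponent == "A" and my_choice == "Y") or \
--         (opponent == "B" and my_choice == "Z") or \
--         (opponent == "C" and my_choice == "X"):
--         return "w"
--
--     if (opponent == "A" and my_choice == "Z") or \
--         (opponent == "B" and my_choice == "X") or \
--         (opponent == "C" and my_choice == "Y"):
--         return "l"
--
--     else:
--         return "d"
--
-- def rps_reverse(opponent: str, outc: str) -> str:
--
--     possibilities = ["X", "Y", "Z"]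
--
--     if outc == "Y": #draw
--         return opponent
--
--     if outc == "Z": #win
--         for pos in possibilities:
--             if rps_result(opponent, pos) == 'w':
--                 return pos
--
--     else: # lose
--         for pos in possibilities:
--             if rps_result(opponent, pos) == 'l':
--                 return pos
-- ===== SOURCE B (Python) =====
-- WIN_TABLE = {"A": "Y", "B": "Z", "C": "X"}
-- LOSE_TABLE = {"A": "Z", "B": "X", "C": "Y"}
--
-- def rps_reverse(opponent: str, outc: str) -> str:
--     if outc == "Y":  # draw
--         return opponent
--     if outc == "Z":  # win
--         return WIN_TABLE.get(opponent)
--     else:  # lose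
--         return LOSE_TABLE.get(opponent)
-- ===== Notes on version B (the rewrite author's own statement) =====
-- stated objective: simpler
-- what changed: Replaces the two scans over X/Y/Z with rps_result calls by direct constant table lookups (dict.get), keeping the Y/Z/else branch order.
import Mathlib
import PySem

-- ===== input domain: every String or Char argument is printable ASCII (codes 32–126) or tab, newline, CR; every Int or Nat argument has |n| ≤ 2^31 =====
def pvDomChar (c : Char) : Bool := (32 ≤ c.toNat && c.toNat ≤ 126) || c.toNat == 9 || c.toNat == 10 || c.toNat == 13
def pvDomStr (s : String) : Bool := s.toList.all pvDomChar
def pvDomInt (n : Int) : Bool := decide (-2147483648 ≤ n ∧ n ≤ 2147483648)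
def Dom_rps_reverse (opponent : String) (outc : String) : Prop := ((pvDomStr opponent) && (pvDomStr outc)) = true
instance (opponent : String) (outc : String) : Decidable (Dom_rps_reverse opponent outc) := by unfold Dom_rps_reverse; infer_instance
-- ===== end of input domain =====

-- B replaces the two X/Y/Z scans with direct constant-table lookups (simpler); return value only.

-- ===== PORT A =====
def rps_result (opponent : String) (my_choice : String) : String :=
  if (opponent == "A" && my_choice == "Y") ||
     (opponent == "B" && my_choice == "Z") ||
     (opponent == "C" && my_choice == "X") then "w"
  else if (opponent == "A" && my_choice == "Z") ||
          (opponent == "B" && my_choice == "X") ||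
          (opponent == "C" && my_choice == "Y") then "l"
  else "d"

-- the 'for pos in possibilities: if rps_result(opponent, pos) == 'w': return pos' loop (win branch)
def rps_loopW (opponent : String) : List String → Option String
  | [] => none
  | pos :: rest => if rps_result opponent pos == "w" then some pos else rps_loopW opponent rest

-- the lose-branch loop
def rps_loopL (opponent : String) : List String → Option String
  | [] => none
  | pos :: rest => if rps_result opponent pos == "l" then some pos else rps_loopL opponent rest

def rps_reverse (opponent : String) (outc : String) : Option String :=
  let possibilities := ["X", "Y", "Z"]
  if outc == "Y" then some opponent
  else if outc == "Z" then rps_loopW opponent possibilities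
  else rps_loopL opponent possibilities

-- ===== PORT B =====
def winTable : PySem.Dict String String := PySem.Dict.ofList [("A", "Y"), ("B", "Z"), ("C", "X")]
def loseTable : PySem.Dict String String := PySem.Dict.ofList [("A", "Z"), ("B", "X"), ("C", "Y")]

def rps_reverse_alt (opponent : String) (outc : String) : Option String :=
  if outc == "Y" then some opponent
  else if outc == "Z" then winTable.get? opponent
  else loseTable.get? opponent

-- ===== PRECONDITION & SPEC =====
def Spec_rps_reverse (opponent : String) (outc : String) (out : Option String) : Prop := out = rps_reverse_alt opponent outc
instance (opponent : String) (outc : String) (out : Option String) : Decidable (Spec_rps_reverse opponent outc out) := by unfold Spec_rps_reverse; infer_instance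

-- ===== CLAIM (what is proved, stated in full; the proofs are below) =====
def Claim_equal_rps_reverse : Prop := ∀ (opponent : String) (outc : String), Dom_rps_reverse opponent outc → Spec_rps_reverse opponent outc (rps_reverse opponent outc)

-- ===== LEMMAS AND PROOFS =====
lemma loopW_eq (o : String) : rps_loopW o ["X", "Y", "Z"] = winTable.get? o := by
  by_cases hA : o = "A" <;> by_cases hB : o = "B" <;> by_cases hC : o = "C" <;>
    first
    | (simp [hA, hB, hC, rps_loopW, rps_result, winTable, PySem.Dict.ofList, PySem.Dict.get?, PySem.Dict.update, PySem.Dict.empty, PySem.Dict.insert, PySem.Dict.contains, List.find?]; done)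
    | (have hA' : ("A" == o) = false := by simp [Ne.symm hA]
       have hB' : ("B" == o) = false := by simp [Ne.symm hB]
       have hC' : ("C" == o) = false := by simp [Ne.symm hC]
       simp [hA, hB, hC, hA', hB', hC', rps_loopW, rps_result, winTable,
             PySem.Dict.ofList, PySem.Dict.get?, PySem.Dict.update, PySem.Dict.empty,
             PySem.Dict.insert, PySem.Dict.contains, List.find?])

lemma loopL_eq (o : String) : rps_loopL o ["X", "Y", "Z"] = loseTable.get? o := by
  by_cases hA : o = "A" <;> by_cases hB : o = "B" <;> by_cases hC : o = "C" <;>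
    first
    | (simp [hA, hB, hC, rps_loopL, rps_result, loseTable, PySem.Dict.ofList, PySem.Dict.get?, PySem.Dict.update, PySem.Dict.empty, PySem.Dict.insert, PySem.Dict.contains, List.find?]; done)
    | (have hA' : ("A" == o) = false := by simp [Ne.symm hA]
       have hB' : ("B" == o) = false := by simp [Ne.symm hB]
       have hC' : ("C" == o) = false := by simp [Ne.symm hC]
       simp [hA, hB, hC, hA', hB', hC', rps_loopL, rps_result, loseTable,
             PySem.Dict.ofList, PySem.Dict.get?, PySem.Dict.update, PySem.Dict.empty,
             PySem.Dict.insert, PySem.Dict.contains, List.find?])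

-- ===== VERDICT (by name: the statement is the Claim_ definition above) =====
theorem rps_reverse_spec : Claim_equal_rps_reverse := by
  intro o outc _
  unfold Spec_rps_reverse rps_reverse rps_reverse_alt
  by_cases h1 : outc = "Y" <;> by_cases h2 : outc = "Z" <;>
    simp [h1, h2, loopW_eq, loopL_eq]
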